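-- pv_equiv track=rewrite | github.com/vtjong/NLP | latent_struct/cluster.py | heads_2_idx
-- ===== SOURCE A (Python) =====
-- from typing import Set, Dict, List, Tuple
--
-- def heads_2_idx(
--     fs: List[Dict[str, List[Tuple[str, str]]]],
--     u_heads: Set[str]
-- ) -> Dict[str, List[int]]:
--     """
--     Creates a dictionary with heads as keys and a list of frames they appear
--     in as values.
--
--     This function takes a list of semantic frames `fs` and a set of unique
--     head tokens `u_heads`.
--     It creates a dictionary where head tokens are the keys,
--     and the values are lists of frame indices in which each head token appears.
--
--     Parameters:
--     - fs (list): A list of semantic frames, where each frame is represented as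
--       a tuple containing a head token and a list of outgoing dependency labels
--       and their associated dependents.
--     - u_heads (set): A set of unique head tokens.
--
--     Returns:
--     - heads_to_idx (dict): A dictionary where head tokens are keys, and
--       the values are lists of frame indices.
--
--     Example Usage:
--     ```
--     frames = [('like-5', [('nsubj', 'I-3'), ('obj', 'apples-6')]),
--     ('eat-2', [('nsubj', 'She-1'), ('obj', 'pizza-3')])]
--     unique_heads = {'like-5', 'eat-2'}
--
--     heads_indices = heads_2_idx(frames, unique_heads)
--     ```
--     This example creates a dictionary mapping head tokens to the frames they appear in.
--     """
--     heads_to_idx = {}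
--     for head in u_heads:
--         heads_to_idx[head] = [i for i, frame in enumerate(fs) if head ==
--         frame[0][: frame[0].rfind("-")]]
--     return heads_to_idx
-- ===== SOURCE B (Python) =====
-- def heads_2_idx(fs, u_heads):
--     buckets = {}
--     for i, frame in enumerate(fs):
--         key = frame[0][: frame[0].rfind("-")]
--         if key in buckets:
--             buckets[key].append(i)
--         else:
--             buckets[key] = [i]
--     return {head: buckets.get(head, []) for head in u_heads}
-- ===== Notes on version B (the rewrite author's own statement) =====
-- stated objective: faster
-- what changed: Instead of scanning all frames once per head (recomputing each frame's stripped key H times), B makes a single pass over the frames, computes each frame's key once, appends the index to a dict bucket, then reads each head's bucket in O(1).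
import Mathlib
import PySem

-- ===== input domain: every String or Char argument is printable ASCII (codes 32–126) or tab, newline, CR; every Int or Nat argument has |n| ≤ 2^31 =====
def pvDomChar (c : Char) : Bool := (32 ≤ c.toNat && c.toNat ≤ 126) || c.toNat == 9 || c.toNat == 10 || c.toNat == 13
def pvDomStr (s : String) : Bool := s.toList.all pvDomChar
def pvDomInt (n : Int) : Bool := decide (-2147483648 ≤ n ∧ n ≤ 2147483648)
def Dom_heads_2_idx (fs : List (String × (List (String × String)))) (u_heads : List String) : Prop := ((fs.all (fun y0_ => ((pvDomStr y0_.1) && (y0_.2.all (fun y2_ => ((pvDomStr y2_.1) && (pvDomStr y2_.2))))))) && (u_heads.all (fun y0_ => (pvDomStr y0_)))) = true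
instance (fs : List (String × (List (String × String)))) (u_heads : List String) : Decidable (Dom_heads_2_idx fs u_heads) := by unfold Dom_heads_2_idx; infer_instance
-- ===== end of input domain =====

-- B replaces A's per-head scan of all frames by one pass over the frames that buckets
-- indices by each frame's stripped key (O(F+H) instead of O(H*F)); same returned dict.
-- ===== PORT A =====
-- shared key expression: frame[0][: frame[0].rfind("-")]
def pvKey (s : String) : String :=
  PySem.Str.slice s none (some (PySem.Str.rfind s "-"))

def heads_2_idx (fs : List (String × (List (String × String)))) (u_heads : List String) : List (String × List Int) :=
  (u_heads.foldl (fun d head =>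
      d.insert head ((PySem.List.enumerate fs).filterMap
        (fun p => if head == pvKey p.2.1 then some p.1 else none)))
    PySem.Dict.empty).items

-- ===== PORT B =====
def heads_2_idx_alt (fs : List (String × (List (String × String)))) (u_heads : List String) : List (String × List Int) :=
  let buckets := (PySem.List.enumerate fs).foldl
    (fun d p =>
      let key := pvKey p.2.1
      if d.contains key then d.insert key (d.getD key [] ++ [p.1])
      else d.insert key [p.1])
    PySem.Dict.empty
  (u_heads.foldl (fun d head => d.insert head (buckets.getD head [])) PySem.Dict.empty).items

-- ===== PRECONDITION & SPEC =====
def Spec_heads_2_idx (fs : List (String × (List (String × String)))) (u_heads : List String) (out : List (String × List Int)) : Prop := out = heads_2_idx_alt fs u_heads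
instance (fs : List (String × (List (String × String)))) (u_heads : List String) (out : List (String × List Int)) : Decidable (Spec_heads_2_idx fs u_heads out) := by unfold Spec_heads_2_idx; infer_instance

-- ===== CLAIM (what is proved, stated in full; the proofs are below) =====
def Claim_equal_heads_2_idx : Prop := ∀ (fs : List (String × (List (String × String)))) (u_heads : List String), Dom_heads_2_idx fs u_heads → Spec_heads_2_idx fs u_heads (heads_2_idx fs u_heads)

-- ===== LEMMAS AND PROOFS =====

-- ===== VERDICT (by name: the statement is the Claim_ definition above) =====

theorem buckets_getD (l : List (Int × (String × List (String × String))))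
    (d : PySem.Dict String (List Int)) (h : String) :
    (l.foldl (fun d p =>
        let key := pvKey p.2.1
        if d.contains key then d.insert key (d.getD key [] ++ [p.1])
        else d.insert key [p.1]) d).getD h []
      = d.getD h [] ++ l.filterMap (fun p => if h == pvKey p.2.1 then some p.1 else none) := by
  induction l generalizing d with
  | nil => simp
  | cons p rest ih =>
    simp only [List.foldl_cons, List.filterMap_cons]
    by_cases hc : d.contains (pvKey p.2.1) = true
    · rw [if_pos hc, ih]
      by_cases he : h = pvKey p.2.1
      · subst he
        rw [PySem.Dict.getD_insert, if_pos rfl]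
        simp
      · rw [PySem.Dict.getD_insert, if_neg he]
        simp [he]
    · rw [if_neg hc, ih]
      have hz : d.getD (pvKey p.2.1) [] = [] := by
        rw [PySem.Dict.getD_eq_get?_getD]
        cases hg : d.get? (pvKey p.2.1) with
        | none => rfl
        | some v => exact absurd (by rw [PySem.Dict.contains_eq_isSome_get?, hg]; rfl) hc
      by_cases he : h = pvKey p.2.1
      · subst he
        rw [PySem.Dict.getD_insert, if_pos rfl, hz]
        simp
      · rw [PySem.Dict.getD_insert, if_neg he]
        simp [he]

theorem heads_2_idx_spec : Claim_equal_heads_2_idx := by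
  intro fs u_heads _
  unfold Spec_heads_2_idx heads_2_idx heads_2_idx_alt
  have hfun : (fun (d : PySem.Dict String (List Int)) head =>
      d.insert head (((PySem.List.enumerate fs).foldl
        (fun d p =>
          let key := pvKey p.2.1
          if d.contains key then d.insert key (d.getD key [] ++ [p.1])
          else d.insert key [p.1]) PySem.Dict.empty).getD head []))
      = (fun (d : PySem.Dict String (List Int)) head =>
      d.insert head ((PySem.List.enumerate fs).filterMap
        (fun p => if head == pvKey p.2.1 then some p.1 else none))) := by
    funext d head
    rw [buckets_getD]
    simp
  simp only [hfun]
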